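-- pv_equiv track=rewrite | github.com/Abhi52897340598327/MTFC_Inventors | Data_Sources/data_cleaning/clean_needed_sources.py | uniquify_columns
-- ===== SOURCE A (Python) =====
-- def uniquify_columns(cols: list[str]) -> list[str]:
--     seen: dict[str, int] = {}
--     out = []
--     for c in cols:
--         n = seen.get(c, 0)
--         if n == 0:
--             out.append(c)
--         else:
--             out.append(f"{c}_{n}")
--         seen[c] = n + 1
--     return out
-- ===== SOURCE B (Python) =====
-- def uniquify_columns(cols: list[str]) -> list[str]:
--     counts: dict[str, int] = {}
--     for c in cols:
--         counts[c] = counts.get(c, 0) + 1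
--     out = []
--     for c in reversed(cols):
--         counts[c] -= 1
--         r = counts[c]
--         out.append(c if r == 0 else f"{c}_{r}")
--     out.reverse()
--     return out
-- ===== Notes on version B (the rewrite author's own statement) =====
-- stated objective: alternative
-- what changed: Instead of a single forward pass with a running seen-counter, B first counts all occurrences, then builds the output back-to-front while decrementing the counter (remaining-prefix counts), reversing at the end.
import Mathlib
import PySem

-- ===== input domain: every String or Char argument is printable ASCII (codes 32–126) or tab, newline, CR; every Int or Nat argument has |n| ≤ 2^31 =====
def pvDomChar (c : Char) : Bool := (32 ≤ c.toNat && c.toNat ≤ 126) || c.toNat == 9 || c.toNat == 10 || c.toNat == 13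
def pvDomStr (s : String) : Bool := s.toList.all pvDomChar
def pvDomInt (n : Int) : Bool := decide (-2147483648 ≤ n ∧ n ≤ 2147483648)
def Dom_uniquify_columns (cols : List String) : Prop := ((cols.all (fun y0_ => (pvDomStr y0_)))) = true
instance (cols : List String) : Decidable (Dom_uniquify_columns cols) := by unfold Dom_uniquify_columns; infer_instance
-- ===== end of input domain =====

-- B replaces A's single forward pass with a running seen-counter by two passes: count all
-- occurrences, then build the output back-to-front while decrementing the counter (objective:
-- alternative decomposition, same cost).

-- ===== PORT A =====
-- one forward pass; seen.get(c, 0), append, seen[c] = n + 1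
def uniquify_columns (cols : List String) : List String :=
  (cols.foldl
    (fun (st : PySem.Dict String Int × List String) c =>
      let n := st.1.getD c 0
      let out := if n = 0 then st.2 ++ [c] else st.2 ++ [c ++ "_" ++ PySem.Int.toStr n]
      (st.1.insert c (n + 1), out))
    (PySem.Dict.empty, [])).2

-- ===== PORT B =====
-- pass 1: counts[c] = counts.get(c, 0) + 1
-- pass 2: iterate reversed(cols), counts[c] -= 1, render, then reverse the result
def uniquify_columns_alt (cols : List String) : List String :=
  let counts := cols.foldl (fun (d : PySem.Dict String Int) c => d.insert c (d.getD c 0 + 1))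
    PySem.Dict.empty
  let st := cols.reverse.foldl
    (fun (st : PySem.Dict String Int × List String) c =>
      let d := st.1.insert c (st.1.getD c 0 - 1)
      let r := d.getD c 0
      (d, st.2 ++ [if r = 0 then c else c ++ "_" ++ PySem.Int.toStr r]))
    (counts, [])
  st.2.reverse

-- ===== PRECONDITION & SPEC =====
def Spec_uniquify_columns (cols : List String) (out : List String) : Prop := out = uniquify_columns_alt cols
instance (cols : List String) (out : List String) : Decidable (Spec_uniquify_columns cols out) := by unfold Spec_uniquify_columns; infer_instance

-- ===== CLAIM (what is proved, stated in full; the proofs are below) =====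
def Claim_equal_uniquify_columns : Prop := ∀ (cols : List String), Dom_uniquify_columns cols → Spec_uniquify_columns cols (uniquify_columns cols)

-- ===== LEMMAS AND PROOFS =====

-- shared characterisation: element i is rendered with the count of cols[i] in cols[:i]
def pvSpecAux : List String → List String → List String
  | _, [] => []
  | pre, c :: rest =>
      (if ((pre.count c : Int)) = 0 then c else c ++ "_" ++ PySem.Int.toStr (pre.count c))
        :: pvSpecAux (pre ++ [c]) rest

lemma pvSpecAux_snoc (rest : List String) : ∀ (pre : List String) (c : String),
    pvSpecAux pre (rest ++ [c]) =
      pvSpecAux pre rest ++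
        [if (((pre ++ rest).count c : Int)) = 0 then c
         else c ++ "_" ++ PySem.Int.toStr ((pre ++ rest).count c)] := by
  induction rest with
  | nil => intro pre c; simp [pvSpecAux]
  | cons x rest ih =>
      intro pre c
      simp only [List.cons_append, pvSpecAux, ih (pre ++ [x]) c, List.append_assoc,
        List.nil_append]

lemma pvLoopA (rest : List String) : ∀ (pre : List String) (d : PySem.Dict String Int)
    (out : List String), (∀ c, d.getD c 0 = (pre.count c : Int)) →
    (rest.foldl
      (fun (st : PySem.Dict String Int × List String) c =>
        let n := st.1.getD c 0
        let out := if n = 0 then st.2 ++ [c] else st.2 ++ [c ++ "_" ++ PySem.Int.toStr n]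
        (st.1.insert c (n + 1), out))
      (d, out)).2 = out ++ pvSpecAux pre rest := by
  induction rest with
  | nil => intro pre d out _; simp [pvSpecAux]
  | cons c rest ih =>
      intro pre d out hd
      simp only [List.foldl_cons]
      have step := ih (pre ++ [c]) (d.insert c (d.getD c 0 + 1))
        (if d.getD c 0 = 0 then out ++ [c] else out ++ [c ++ "_" ++ PySem.Int.toStr (d.getD c 0)])
        (by
          intro c'
          rw [PySem.Dict.getD_insert]
          by_cases h : c' = c
          · subst h
            rw [if_pos rfl, hd c']
            simp [List.count_append]
          · rw [if_neg h, hd c']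
            simp [List.count_append, Ne.symm h])
      simp only [pvSpecAux, hd c] at step ⊢
      rw [step]
      split_ifs <;> simp

lemma pvCounts (l : List String) : ∀ (d : PySem.Dict String Int) (c : String),
    (l.foldl (fun (d : PySem.Dict String Int) c => d.insert c (d.getD c 0 + 1)) d).getD c 0
      = d.getD c 0 + l.count c := by
  induction l with
  | nil => intro d c; simp
  | cons x l ih =>
      intro d c
      simp only [List.foldl_cons, ih]
      rw [PySem.Dict.getD_insert]
      by_cases h : c = x
      · subst h
        rw [if_pos rfl]
        simp
        ring
      · rw [if_neg h]
        simp [Ne.symm h]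

lemma pvLoopB (rest : List String) : ∀ (pre : List String) (d : PySem.Dict String Int)
    (out : List String), (∀ c, d.getD c 0 = ((pre ++ rest).count c : Int)) →
    (rest.reverse.foldl
      (fun (st : PySem.Dict String Int × List String) c =>
        let d := st.1.insert c (st.1.getD c 0 - 1)
        let r := d.getD c 0
        (d, st.2 ++ [if r = 0 then c else c ++ "_" ++ PySem.Int.toStr r]))
      (d, out)).2 = out ++ (pvSpecAux pre rest).reverse := by
  induction rest using List.reverseRecOn with
  | nil => intro pre d out _; simp [pvSpecAux]
  | append_singleton rest c ih =>
      intro pre d out hd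
      simp only [List.reverse_append, List.reverse_singleton, List.singleton_append,
        List.foldl_cons]
      have hr : (PySem.Dict.insert d c (d.getD c 0 - 1)).getD c 0
          = (((pre ++ rest).count c : Int)) := by
        rw [PySem.Dict.getD_insert, if_pos rfl, hd c]
        simp [List.count_append]
        omega
      have step := ih pre (d.insert c (d.getD c 0 - 1))
        (out ++ [if (PySem.Dict.insert d c (d.getD c 0 - 1)).getD c 0 = 0 then c
          else c ++ "_" ++ PySem.Int.toStr ((PySem.Dict.insert d c (d.getD c 0 - 1)).getD c 0)])
        (by
          intro c'
          rw [PySem.Dict.getD_insert]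
          by_cases h : c' = c
          · subst h
            rw [if_pos rfl, hd c']
            simp [List.count_append]
            omega
          · rw [if_neg h, hd c']
            simp [List.count_append, Ne.symm h])
      rw [step, pvSpecAux_snoc, hr]
      simp [List.append_assoc]

-- ===== VERDICT (by name: the statement is the Claim_ definition above) =====
theorem uniquify_columns_spec : Claim_equal_uniquify_columns := by
  intro cols _
  show uniquify_columns cols = uniquify_columns_alt cols
  have hA : uniquify_columns cols = pvSpecAux [] cols := by
    unfold uniquify_columns
    rw [pvLoopA cols [] PySem.Dict.empty [] (by intro c; simp)]
    simp
  have hB : uniquify_columns_alt cols = pvSpecAux [] cols := by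
    show ((cols.reverse.foldl
        (fun (st : PySem.Dict String Int × List String) c =>
          let d := st.1.insert c (st.1.getD c 0 - 1)
          let r := d.getD c 0
          (d, st.2 ++ [if r = 0 then c else c ++ "_" ++ PySem.Int.toStr r]))
        (cols.foldl (fun (d : PySem.Dict String Int) c => d.insert c (d.getD c 0 + 1))
          PySem.Dict.empty, [])).2).reverse = pvSpecAux [] cols
    rw [pvLoopB cols []
      (cols.foldl (fun (d : PySem.Dict String Int) c => d.insert c (d.getD c 0 + 1))
        PySem.Dict.empty) []
      (by intro c; rw [pvCounts]; simp)]
    simp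
  rw [hA, hB]
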